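-- pv_equiv track=rewrite | github.com/cambridge-cares/TheWorldAvatar | MOPTools/MOP_Discovery/kg_overview/analytics_operations.py | create_preR2
-- ===== SOURCE A (Python) =====
-- def create_preR2(list_gbus, list_gbus_am):
--     """Creates a dictionary of GBUs nested with lists of related AMs."""
--     list_preR2 = {}
--     for gbu_am_string in list_gbus:
--         list_ams = []
--         for gbu_dict in list_gbus_am:
--             if gbu_am_string in gbu_dict.keys():
--                 value = gbu_dict[gbu_am_string]
--                 list_ams.append(value)
--             if gbu_am_string not in gbu_dict.keys():
--                 pass
--         mydict = {gbu_am_string:list_ams}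
--         list_preR2.update(mydict)
--     return list_preR2
-- ===== SOURCE B (Python) =====
-- def create_preR2(list_gbus, list_gbus_am):
--     """Creates a dictionary of GBUs nested with lists of related AMs."""
--     index = {}
--     for gbu_dict in list_gbus_am:
--         for key, value in gbu_dict.items():
--             index.setdefault(key, []).append(value)
--     return {gbu: index.get(gbu, []) for gbu in list_gbus}
-- ===== Notes on version B (the rewrite author's own statement) =====
-- stated objective: faster
-- what changed: B builds a key->values index in one pass over list_gbus_am and then answers each GBU by a single dict lookup, instead of A's rescan of all of list_gbus_am for every GBU.
import Mathlib
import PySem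

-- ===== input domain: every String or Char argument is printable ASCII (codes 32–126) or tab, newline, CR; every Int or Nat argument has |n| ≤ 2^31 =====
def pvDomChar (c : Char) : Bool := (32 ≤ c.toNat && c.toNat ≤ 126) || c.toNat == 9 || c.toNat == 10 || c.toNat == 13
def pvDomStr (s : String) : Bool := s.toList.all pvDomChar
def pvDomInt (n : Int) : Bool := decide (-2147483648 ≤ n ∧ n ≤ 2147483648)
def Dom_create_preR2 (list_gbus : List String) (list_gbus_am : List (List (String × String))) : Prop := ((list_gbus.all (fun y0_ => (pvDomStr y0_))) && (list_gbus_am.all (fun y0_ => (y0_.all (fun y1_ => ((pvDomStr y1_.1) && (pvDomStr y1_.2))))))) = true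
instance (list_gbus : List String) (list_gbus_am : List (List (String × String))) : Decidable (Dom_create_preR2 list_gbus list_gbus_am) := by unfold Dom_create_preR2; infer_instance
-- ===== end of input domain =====

-- B replaces A's rescan of list_gbus_am per GBU with a single grouping pass building a key->values index, then one lookup per GBU (asymptotically faster).


-- ===== PORT A =====
-- A: for each gbu rescan every dict of list_gbus_am, collecting the value whenever the key is present.
def create_preR2 (list_gbus : List String) (list_gbus_am : List (List (String × String))) : List (String × List String) :=
  (list_gbus.foldl (fun list_preR2 gbu_am_string =>
      let list_ams := list_gbus_am.foldl (fun list_ams gbu_dict =>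
          match (PySem.Dict.ofList gbu_dict).get? gbu_am_string with
          | some value => list_ams ++ [value]
          | none => list_ams) []
      list_preR2.insert gbu_am_string list_ams) PySem.Dict.empty).items

-- ===== PORT B =====
-- B: one grouping pass over list_gbus_am building key -> list of values, then one lookup per gbu.
def create_preR2_alt (list_gbus : List String) (list_gbus_am : List (List (String × String))) : List (String × List String) :=
  let index := list_gbus_am.foldl (fun idx gbu_dict =>
      (PySem.Dict.ofList gbu_dict).items.foldl
        (fun idx kv => idx.modify kv.1 [] (fun l => l ++ [kv.2])) idx)
    PySem.Dict.empty
  (list_gbus.foldl (fun out gbu => out.insert gbu (index.getD gbu [])) PySem.Dict.empty).items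

-- ===== PRECONDITION & SPEC =====
def Spec_create_preR2 (list_gbus : List String) (list_gbus_am : List (List (String × String))) (out : List (String × List String)) : Prop := out = create_preR2_alt list_gbus list_gbus_am
instance (list_gbus : List String) (list_gbus_am : List (List (String × String))) (out : List (String × List String)) : Decidable (Spec_create_preR2 list_gbus list_gbus_am out) := by unfold Spec_create_preR2; infer_instance

-- ===== CLAIM (what is proved, stated in full; the proofs are below) =====
def Claim_equal_create_preR2 : Prop := ∀ (list_gbus : List String) (list_gbus_am : List (List (String × String))), Dom_create_preR2 list_gbus list_gbus_am → Spec_create_preR2 list_gbus list_gbus_am (create_preR2 list_gbus list_gbus_am)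

-- ===== LEMMAS AND PROOFS =====

-- a fold of inner folds is a fold over the flattened list
theorem foldl_foldl_flatMap {α β γ : Type} (g : α → List β) (f : γ → β → γ)
    (l : List α) (init : γ) :
    l.foldl (fun acc d => (g d).foldl f acc) init = (l.flatMap g).foldl f init := by
  induction l generalizing init with
  | nil => rfl
  | cons d rest ih => simp [List.flatMap_cons, List.foldl_append, ih]

-- in a list of pairs with distinct keys, filtering by a key and taking values
-- is exactly the optional first-match lookup
theorem filter_map_eq_get? (ps : List (String × String)) (g : String)
    (h : (ps.map Prod.fst).Nodup) :
    (ps.filter (fun p => p.1 == g)).map (·.2)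
      = ((PySem.Dict.mk ps).get? g).elim [] (fun v => [v]) := by
  induction ps with
  | nil => simp [PySem.Dict.get?]
  | cons kv rest ih =>
    obtain ⟨k, v⟩ := kv
    simp only [List.map_cons, List.nodup_cons] at h
    rw [PySem.Dict.get?_mk_cons]
    by_cases hk : k = g
    · subst hk
      have hrest : rest.filter (fun p => p.1 == k) = [] := by
        rw [List.filter_eq_nil_iff]
        intro p hp
        simp only [beq_iff_eq]
        exact fun he => h.1 (he ▸ List.mem_map_of_mem hp)
      simp [hrest]
    · have hb : ((k, v).1 == g) = false := by simpa using hk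
      simp [hb, ih h.2]

-- A's inner loop, with general accumulator
theorem a_inner_loop (lga : List (List (String × String))) (g : String)
    (acc : List String) :
    lga.foldl (fun list_ams gbu_dict =>
        match (PySem.Dict.ofList gbu_dict).get? g with
        | some value => list_ams ++ [value]
        | none => list_ams) acc
      = acc ++ lga.flatMap (fun d =>
          ((PySem.Dict.ofList d).get? g).elim [] (fun v => [v])) := by
  induction lga generalizing acc with
  | nil => simp
  | cons d rest ih =>
    simp only [List.foldl_cons, List.flatMap_cons, ih]
    cases hd : (PySem.Dict.ofList d).get? g <;> simp

-- filtering/mapping a flatMap distributes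
theorem filter_map_flatMap {α β : Type} (l : List α) (g : α → List (String × β)) (c : String) :
    ((l.flatMap g).filter (fun p => p.1 == c)).map (·.2)
      = l.flatMap (fun d => ((g d).filter (fun p => p.1 == c)).map (·.2)) := by
  induction l with
  | nil => rfl
  | cons d rest ih => simp [List.flatMap_cons, List.filter_append, ih]

-- per-GBU: A's collected list equals B's index lookup
theorem value_eq (lga : List (List (String × String))) (g : String) :
    lga.foldl (fun list_ams gbu_dict =>
        match (PySem.Dict.ofList gbu_dict).get? g with
        | some value => list_ams ++ [value]
        | none => list_ams) []
      = (lga.foldl (fun idx gbu_dict =>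
          (PySem.Dict.ofList gbu_dict).items.foldl
            (fun idx kv => idx.modify kv.1 [] (fun l => l ++ [kv.2])) idx)
          PySem.Dict.empty).getD g [] := by
  rw [a_inner_loop, List.nil_append,
      foldl_foldl_flatMap (fun d => (PySem.Dict.ofList d).items)]
  rw [PySem.Dict.getD_foldl_modify_append, PySem.Dict.getD_empty, List.nil_append]
  rw [filter_map_flatMap]
  apply List.flatMap_congr
  intro d _
  have hnd : ((PySem.Dict.ofList d).items.map Prod.fst).Nodup := by
    have := PySem.Dict.nodup_keys_ofList (κ := String) (ν := String) d
    simpa [PySem.Dict.keys] using this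
  have := filter_map_eq_get? (PySem.Dict.ofList d).items g hnd
  rw [this]

-- an insert-loop depends only on the per-key value function
theorem foldl_insert_congr (F G : String → List String) (h : ∀ g, F g = G g)
    (lg : List String) (d : PySem.Dict String (List String)) :
    lg.foldl (fun acc g => acc.insert g (F g)) d
      = lg.foldl (fun acc g => acc.insert g (G g)) d := by
  induction lg generalizing d with
  | nil => rfl
  | cons g rest ih => simp only [List.foldl_cons, h g, ih]

-- ===== VERDICT (by name: the statement is the Claim_ definition above) =====
theorem create_preR2_spec : Claim_equal_create_preR2 := by
  intro list_gbus list_gbus_am _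
  unfold Spec_create_preR2 create_preR2 create_preR2_alt
  congr 1
  exact foldl_insert_congr _ _ (fun g => value_eq list_gbus_am g) list_gbus _
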